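-- pv_equiv track=rewrite | github.com/RobbeW/Data_Statistiek_R | Deel 3 Algoritmiek/04 Gretige algoritmen/Evaluatie/11 Kleinste grote deellijst/solution/solution.nl.py | kleinste_grote_deel
-- ===== SOURCE A (Python) =====
-- def kleinste_grote_deel(lijst):
--     n = len(lijst)
--     som = sum(lijst)
--
--     lijst.sort(reverse = True)
--     result = []
--     temp = 0
--     i = 0
--     while i < n and temp <= (som - temp):
--         temp += lijst[i]
--         result.append(lijst[i])
--         i += 1
--
--     return result
-- ===== SOURCE B (Python) =====
-- # B: same in-place sort, then prefix-sum table + threshold scan + slice (instead of A's single greedy append loop).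
-- # Note: like A, this sorts `lijst` in place (same observable mutation).
-- def kleinste_grote_deel(lijst):
--     som = sum(lijst)
--     lijst.sort(reverse=True)
--     pref = [0]
--     s = 0
--     for x in lijst:
--         s += x
--         pref.append(s)
--     k = next((j for j, p in enumerate(pref) if 2 * p > som), len(lijst))
--     return lijst[:k]
-- ===== Notes on version B (the rewrite author's own statement) =====
-- stated objective: idiomatic
-- what changed: Replaced A's single greedy while-loop that accumulates a running sum and appends elements one by one with a prefix-sum table built in one pass, a threshold scan (first index j with 2*pref[j] > som) and a slice lijst[:k].
import Mathlib
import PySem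

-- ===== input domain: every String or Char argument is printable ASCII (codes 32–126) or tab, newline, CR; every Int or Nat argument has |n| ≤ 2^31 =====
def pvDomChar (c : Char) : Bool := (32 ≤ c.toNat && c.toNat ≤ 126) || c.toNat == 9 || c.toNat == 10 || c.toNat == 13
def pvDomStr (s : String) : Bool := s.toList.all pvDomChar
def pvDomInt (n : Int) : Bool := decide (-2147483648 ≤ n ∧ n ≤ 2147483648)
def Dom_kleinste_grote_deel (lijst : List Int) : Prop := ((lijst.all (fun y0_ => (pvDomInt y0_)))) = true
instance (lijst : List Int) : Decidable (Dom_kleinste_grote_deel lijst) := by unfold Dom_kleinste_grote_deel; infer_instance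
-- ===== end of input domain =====

-- B replaces A's greedy accumulate-and-append while-loop by prefix sums + a threshold scan + a slice (idiomatic decomposition, same cost).
-- Both A and B sort `lijst` in place in Python; the equivalence proved here is about the return value.

-- ===== PORT A =====
-- the while loop `while i < n and temp <= (som - temp): temp += lijst[i]; result.append(lijst[i]); i += 1`
-- as structural recursion over the tail of the sorted list (i < n ↔ tail nonempty)
def kgdLoopA (som : Int) : List Int → Int → List Int
  | [], _ => []
  | x :: xs, temp => if temp ≤ som - temp then x :: kgdLoopA som xs (temp + x) else []

def kleinste_grote_deel (lijst : List Int) : List Int :=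
  let som := lijst.sum
  let sorted := PySem.List.sorted lijst (fun x => x) true
  kgdLoopA som sorted 0

-- ===== PORT B =====
-- the loop `s += x; pref.append(s)` building the prefix-sum tail, as structural recursion with state s
def kgdPref (s : Int) : List Int → List Int
  | [] => []
  | x :: xs => (s + x) :: kgdPref (s + x) xs

def kleinste_grote_deel_alt (lijst : List Int) : List Int :=
  let som := lijst.sum
  let sorted := PySem.List.sorted lijst (fun x => x) true
  let pref := 0 :: kgdPref 0 sorted
  -- next((j for j, p in enumerate(pref) if 2 * p > som), len(lijst))
  let k := (pref.findIdx? (fun p => 2 * p > som)).getD sorted.length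
  -- lijst[:k] with 0 ≤ k ≤ len: take
  sorted.take k

-- ===== PRECONDITION & SPEC =====
def Spec_kleinste_grote_deel (lijst : List Int) (out : List Int) : Prop := out = kleinste_grote_deel_alt lijst
instance (lijst : List Int) (out : List Int) : Decidable (Spec_kleinste_grote_deel lijst out) := by unfold Spec_kleinste_grote_deel; infer_instance

-- ===== CLAIM (what is proved, stated in full; the proofs are below) =====
def Claim_equal_kleinste_grote_deel : Prop := ∀ (lijst : List Int), Dom_kleinste_grote_deel lijst → Spec_kleinste_grote_deel lijst (kleinste_grote_deel lijst)

-- ===== LEMMAS AND PROOFS =====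

-- the greedy loop from running sum t equals taking up to the first prefix sum (starting at t) exceeding half
theorem kgd_loop_eq_take (som : Int) (xs : List Int) (t : Int) :
    kgdLoopA som xs t =
      xs.take (((t :: kgdPref t xs).findIdx? (fun p => 2 * p > som)).getD xs.length) := by
  induction xs generalizing t with
  | nil =>
    simp [kgdLoopA, kgdPref, List.findIdx?]
  | cons x xs ih =>
    simp only [kgdLoopA, kgdPref, List.findIdx?_cons]
    by_cases h : 2 * t > som
    · have h' : ¬ (t ≤ som - t) := by omega
      simp [h, h']
    · have h' : t ≤ som - t := by omega
      simp only [h, decide_false, ih (t + x)]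
      have : ∀ (o : Option Nat) (d : Nat),
          ((o.map (· + 1)).getD (d + 1)) = o.getD d + 1 := by
        intro o d; cases o <;> rfl
      simp [h', List.length_cons, this, List.findIdx?_cons]

-- ===== VERDICT (by name: the statement is the Claim_ definition above) =====
theorem kleinste_grote_deel_spec : Claim_equal_kleinste_grote_deel := by
  intro lijst _
  unfold Spec_kleinste_grote_deel kleinste_grote_deel kleinste_grote_deel_alt
  exact kgd_loop_eq_take _ _ 0
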